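-- pv_equiv track=rewrite | github.com/proecheng/cad-spec-gen | tools/model_audit.py | _readiness_status
-- ===== SOURCE A (Python) =====
-- from typing import Any
--
-- def _readiness_status(part_summaries: list[dict[str, Any]]) -> str:
--     if not part_summaries:
--         return "not_available"
--     if any(item["user_status"] == "blocked" for item in part_summaries):
--         return "blocked"
--     if any(item["user_status"] == "needs_review" for item in part_summaries):
--         return "needs_review"
--     return "ready"
-- ===== SOURCE B (Python) =====
-- from typing import Any
--
-- def _readiness_status(part_summaries: list[dict[str, Any]]) -> str:
--     if not part_summaries:
--         return "not_available"
--     saw_needs_review = False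
--     for item in part_summaries:
--         status = item["user_status"]
--         if status == "blocked":
--             return "blocked"
--         if status == "needs_review":
--             saw_needs_review = True
--     return "needs_review" if saw_needs_review else "ready"
-- ===== Notes on version B (the rewrite author's own statement) =====
-- stated objective: alternative
-- what changed: Replaced A's two separate any() scans with a single pass that returns 'blocked' immediately and carries a saw_needs_review flag, preserving the blocked-over-needs_review precedence.
import Mathlib
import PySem

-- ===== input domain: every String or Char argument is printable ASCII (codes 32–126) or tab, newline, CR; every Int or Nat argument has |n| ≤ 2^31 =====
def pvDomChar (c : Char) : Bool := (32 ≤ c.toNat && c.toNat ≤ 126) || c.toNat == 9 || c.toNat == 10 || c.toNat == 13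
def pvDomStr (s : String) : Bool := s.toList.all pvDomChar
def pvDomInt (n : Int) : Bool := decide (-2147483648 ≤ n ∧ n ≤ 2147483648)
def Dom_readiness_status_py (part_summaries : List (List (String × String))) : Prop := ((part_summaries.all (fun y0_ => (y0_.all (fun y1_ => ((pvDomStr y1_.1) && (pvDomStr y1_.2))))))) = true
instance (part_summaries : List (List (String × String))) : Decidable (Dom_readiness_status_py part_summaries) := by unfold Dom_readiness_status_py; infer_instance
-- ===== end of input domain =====

-- B replaces A's two any() scans with a single pass carrying a saw_needs_review flag (same cost, one traversal).


-- ===== PORT A =====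
-- item["user_status"] is ported as (lookup …).getD ""; this is exact wherever Python does not
-- raise KeyError — Pre_ below admits exactly the inputs where A returns normally.
def pvStatus (item : List (String × String)) : String :=
  (item.lookup "user_status").getD ""

def readiness_status_py (part_summaries : List (List (String × String))) : String :=
  if part_summaries = [] then "not_available"
  else if part_summaries.any (fun item => pvStatus item = "blocked") then "blocked"
  else if part_summaries.any (fun item => pvStatus item = "needs_review") then "needs_review"
  else "ready"

-- ===== PORT B =====
def pvAltStatus (item : List (String × String)) : String :=
  (item.lookup "user_status").getD ""

def pvAltLoop (items : List (List (String × String))) (saw_needs_review : Bool) : String :=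
  match items with
  | [] => if saw_needs_review then "needs_review" else "ready"
  | item :: rest =>
      let status := pvAltStatus item
      if status = "blocked" then "blocked"
      else pvAltLoop rest (if status = "needs_review" then true else saw_needs_review)

def readiness_status_py_alt (part_summaries : List (List (String × String))) : String :=
  if part_summaries = [] then "not_available"
  else pvAltLoop part_summaries false

-- ===== PRECONDITION & SPEC =====
-- Pre_ excludes exactly the inputs on which Python A raises KeyError: an item without a
-- "user_status" key that is not preceded by a "blocked" item (B raises there too).
def Pre_readiness_status_py (part_summaries : List (List (String × String))) : Prop :=
  ∀ i, i < part_summaries.length →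
    (part_summaries[i]!.lookup "user_status" = none →
      (part_summaries.take i).any (fun item => item.lookup "user_status" = some "blocked") = true)
instance (part_summaries : List (List (String × String))) : Decidable (Pre_readiness_status_py part_summaries) := by unfold Pre_readiness_status_py; exact Nat.decidableBallLT _ _
def pvWitness_readiness_status_py : (List (List (String × String))) := [[("user_status", "ready")], [("user_status", "needs_review")]]

def Spec_readiness_status_py (part_summaries : List (List (String × String))) (out : String) : Prop := out = readiness_status_py_alt part_summaries
instance (part_summaries : List (List (String × String))) (out : String) : Decidable (Spec_readiness_status_py part_summaries out) := by unfold Spec_readiness_status_py; infer_instance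

-- ===== CLAIM (what is proved, stated in full; the proofs are below) =====
def Claim_equal_readiness_status_py : Prop := ∀ (part_summaries : List (List (String × String))), Dom_readiness_status_py part_summaries → Pre_readiness_status_py part_summaries → Spec_readiness_status_py part_summaries (readiness_status_py part_summaries)

-- ===== LEMMAS AND PROOFS =====

-- B's loop computes A's two-scan result, for any carried flag.
theorem pvAltLoop_eq (items : List (List (String × String))) (saw : Bool) :
    pvAltLoop items saw =
      (if items.any (fun item => pvStatus item = "blocked") then "blocked"
       else if saw || items.any (fun item => pvStatus item = "needs_review") then "needs_review"
       else "ready") := by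
  induction items generalizing saw with
  | nil => simp [pvAltLoop]
  | cons item rest ih =>
      simp only [pvAltLoop, List.any_cons, ih, show pvAltStatus item = pvStatus item from rfl]
      by_cases hb : pvStatus item = "blocked"
      · simp [hb]
      · by_cases hn : pvStatus item = "needs_review" <;> simp [hb, hn]

-- ===== VERDICT (by name: the statement is the Claim_ definition above) =====
theorem readiness_status_py_spec : Claim_equal_readiness_status_py := by
  intro ps _ _
  unfold Spec_readiness_status_py readiness_status_py readiness_status_py_alt
  by_cases h : ps = []
  · simp [h]
  · simp only [h, if_false, pvAltLoop_eq, Bool.false_or]
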